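-- pv_equiv track=rewrite | github.com/sproutsai-engg/coding_question_generator | json_files/python_codes/Q_842.py | smallest_good_integer
-- ===== SOURCE A (Python) =====
-- def smallest_good_integer(fronts, backs):
--     not_good = {fronts[i] for i in range(len(fronts)) if fronts[i] == backs[i]}
--
--     result = float('inf')
--     for i in range(len(fronts)):
--         if fronts[i] not in not_good:
--             result = min(result, fronts[i])
--         if backs[i] not in not_good:
--             result = min(result, backs[i])
--
--     return 0 if result == float('inf') else result
-- ===== SOURCE B (Python) =====
-- def smallest_good_integer(fronts, backs):
--     bad = set()
--     cand = set()
--     for i in range(len(fronts)):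
--         f, b = fronts[i], backs[i]
--         if f == b:
--             bad.add(f)
--         else:
--             cand.add(f)
--             cand.add(b)
--     for x in sorted(cand):
--         if x not in bad:
--             return x
--     return 0
-- ===== Notes on version B (the rewrite author's own statement) =====
-- stated objective: alternative
-- what changed: Replaces A's second index pass with a float('inf') running-minimum fold by a sort-then-scan: one loop splits values into bad and candidate sets, then the sorted candidates are scanned and the first one not in bad is returned (0 if none).
import Mathlib
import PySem

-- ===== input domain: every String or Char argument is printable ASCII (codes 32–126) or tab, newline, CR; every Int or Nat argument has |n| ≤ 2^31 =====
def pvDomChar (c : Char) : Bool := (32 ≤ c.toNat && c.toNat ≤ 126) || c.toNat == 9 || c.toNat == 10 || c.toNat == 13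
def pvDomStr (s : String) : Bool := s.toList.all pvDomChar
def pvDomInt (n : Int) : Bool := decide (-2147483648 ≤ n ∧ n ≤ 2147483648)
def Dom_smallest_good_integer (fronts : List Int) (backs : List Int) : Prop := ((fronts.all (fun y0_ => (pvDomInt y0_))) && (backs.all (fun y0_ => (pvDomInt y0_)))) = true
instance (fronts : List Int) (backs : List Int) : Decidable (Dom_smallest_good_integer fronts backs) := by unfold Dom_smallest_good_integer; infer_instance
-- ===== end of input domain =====

-- B replaces A's float('inf') running-minimum pass by one loop splitting values into bad/candidate sets followed by a sort-then-first-hit scan (return-value equivalence on Pre_).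

-- ===== PORT A =====
-- result = float('inf') is modelled as the Option Int value none (no Int equals it).
def smallest_good_integer (fronts : List Int) (backs : List Int) : Int :=
  let not_good : PySem.Set Int :=
    (PySem.List.pyRange 0 (fronts.length : Int) 1).foldl
      (fun s i =>
        if PySem.List.pyGetD fronts i 0 = PySem.List.pyGetD backs i 0
        then PySem.Set.add s (PySem.List.pyGetD fronts i 0) else s)
      PySem.Set.empty
  let result : Option Int :=
    (PySem.List.pyRange 0 (fronts.length : Int) 1).foldl
      (fun r i =>
        let r := if !(PySem.Set.contains not_good (PySem.List.pyGetD fronts i 0)) then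
                   some (match r with
                         | none => PySem.List.pyGetD fronts i 0
                         | some v => min v (PySem.List.pyGetD fronts i 0))
                 else r
        if !(PySem.Set.contains not_good (PySem.List.pyGetD backs i 0)) then
          some (match r with
                | none => PySem.List.pyGetD backs i 0
                | some v => min v (PySem.List.pyGetD backs i 0))
        else r)
      none
  match result with
  | none => 0
  | some v => v

-- ===== PORT B =====
-- the early-return 'for x in sorted(cand)' loop is List.find? over the sorted list
def smallest_good_integer_alt (fronts : List Int) (backs : List Int) : Int :=
  let st : PySem.Set Int × PySem.Set Int :=
    (PySem.List.pyRange 0 (fronts.length : Int) 1).foldl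
      (fun s i =>
        let f := PySem.List.pyGetD fronts i 0
        let b := PySem.List.pyGetD backs i 0
        if f = b then (PySem.Set.add s.1 f, s.2)
        else (s.1, PySem.Set.add (PySem.Set.add s.2 f) b))
      (PySem.Set.empty, PySem.Set.empty)
  match (PySem.List.sorted st.2 (fun x => x)).find?
      (fun x => !(PySem.Set.contains st.1 x)) with
  | some x => x
  | none => 0

-- ===== PRECONDITION & SPEC =====
-- A indexes backs[i] for every i < len(fronts): it raises IndexError when backs is shorter.
def Pre_smallest_good_integer (fronts : List Int) (backs : List Int) : Prop :=
  fronts.length ≤ backs.length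
instance (fronts : List Int) (backs : List Int) : Decidable (Pre_smallest_good_integer fronts backs) := by unfold Pre_smallest_good_integer; infer_instance
def pvWitness_smallest_good_integer : List Int × List Int := ([1, 2, 4, 4, 7], [1, 3, 4, 1, 3])

def Spec_smallest_good_integer (fronts : List Int) (backs : List Int) (out : Int) : Prop := out = smallest_good_integer_alt fronts backs
instance (fronts : List Int) (backs : List Int) (out : Int) : Decidable (Spec_smallest_good_integer fronts backs out) := by unfold Spec_smallest_good_integer; infer_instance

-- ===== CLAIM (what is proved, stated in full; the proofs are below) =====
def Claim_equal_smallest_good_integer : Prop := ∀ (fronts : List Int) (backs : List Int), Dom_smallest_good_integer fronts backs → Pre_smallest_good_integer fronts backs → Spec_smallest_good_integer fronts backs (smallest_good_integer fronts backs)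

-- ===== LEMMAS AND PROOFS =====

/-- Python's `result = min(result, x)` with `result` possibly still `float('inf')` (= `none`). -/
def pvOptMin (r : Option Int) (x : Int) : Option Int :=
  some (match r with | none => x | some v => min v x)

/-- B's loop body over a zipped pair. -/
def pvStep (s : PySem.Set Int × PySem.Set Int) (p : Int × Int) : PySem.Set Int × PySem.Set Int :=
  if p.1 = p.2 then (PySem.Set.add s.1 p.1, s.2)
  else (s.1, PySem.Set.add (PySem.Set.add s.2 p.1) p.2)

theorem pv_contains_congr {s t : List Int} (h : ∀ y, y ∈ s ↔ y ∈ t) (x : Int) :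
    PySem.Set.contains s x = PySem.Set.contains t x := by
  rw [Bool.eq_iff_iff, PySem.Set.contains_iff, PySem.Set.contains_iff]; exact h x

theorem pv_foldl_flatMap {α β : Type} (body : β → α → β) (f : β → Int → β)
    (g : α → List Int) (hbody : ∀ r p, body r p = (g p).foldl f r) :
    ∀ (P : List α) (init : β), P.foldl body init = (P.flatMap g).foldl f init := by
  intro P
  induction P with
  | nil => intro init; rfl
  | cons p t ih =>
    intro init
    simp only [List.foldl_cons, List.flatMap_cons, List.foldl_append, hbody, ih]

theorem pv_foldl_optMin_some (t : List Int) : ∀ v, t.foldl pvOptMin (some v) = some (t.foldl min v) := by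
  induction t with
  | nil => intro v; rfl
  | cons x s ih => intro v; simpa [pvOptMin] using ih (min v x)

theorem pv_min?_congr (L M : List Int) (h : ∀ y, y ∈ L ↔ y ∈ M) :
    PySem.List.min? L (fun x => x) = PySem.List.min? M (fun x => x) := by
  cases hL : PySem.List.min? L (fun x => x) with
  | none =>
    rw [PySem.List.min?_eq_none_iff] at hL
    cases hM : PySem.List.min? M (fun x => x) with
    | none => rfl
    | some m =>
      have hm := PySem.List.min?_mem hM
      rw [← h] at hm
      simp [hL] at hm
  | some m =>
    cases hM : PySem.List.min? M (fun x => x) with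
    | none =>
      rw [PySem.List.min?_eq_none_iff] at hM
      have hm := PySem.List.min?_mem hL
      rw [h] at hm
      simp [hM] at hm
    | some m' =>
      have hmem := PySem.List.min?_mem hL
      have hmem' := PySem.List.min?_mem hM
      have h1 := PySem.List.min?_isMin hL m' ((h m').mpr hmem')
      have h2 := PySem.List.min?_isMin hM m ((h m).mp hmem)
      exact congrArg some (le_antisymm h1 h2)

/-- running min with `inf` sentinel over `L` = `min?` of `L`. -/
theorem pv_foldl_vs_min? (L : List Int) :
    (match L.foldl pvOptMin none with | none => 0 | some v => v) =
    (match PySem.List.min? L (fun x => x) with | none => 0 | some m => m) := by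
  cases L with
  | nil => rfl
  | cons x t =>
    rw [PySem.List.min?_id_cons]
    show (match t.foldl pvOptMin (pvOptMin none x) with | none => 0 | some v => v) = _
    simp [pvOptMin, pv_foldl_optMin_some]

theorem pv_foldl_min_of_le (l : List Int) : ∀ x, (∀ y ∈ l, x ≤ y) → l.foldl min x = x := by
  induction l with
  | nil => intro x _; rfl
  | cons a t ih =>
    intro x h
    have hx : min x a = x := min_eq_left (h a (by simp))
    simp only [List.foldl_cons, hx]
    exact ih x (fun y hy => h y (by simp [hy]))

/-- first hit in a `≤`-sorted scan = min of the matching elements. -/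
theorem pv_find?_sorted_eq_min?_filter (L : List Int) (p : Int → Bool)
    (hL : L.Pairwise (· ≤ ·)) :
    L.find? p = PySem.List.min? (L.filter p) (fun x => x) := by
  induction L with
  | nil => rfl
  | cons x t ih =>
    rcases List.pairwise_cons.mp hL with ⟨hx, ht⟩
    by_cases hp : p x = true
    · rw [List.find?_cons_of_pos hp, List.filter_cons_of_pos hp, PySem.List.min?_id_cons]
      have : (t.filter p).foldl min x = x :=
        pv_foldl_min_of_le _ x (fun y hy => hx y (List.mem_of_mem_filter hy))
      rw [this]
    · rw [List.find?_cons_of_neg (by simp [hp]), List.filter_cons_of_neg (by simp [hp])]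
      exact ih ht

theorem pv_mem_bad (P : List (Int × Int)) :
    ∀ (init : PySem.Set Int × PySem.Set Int) (y : Int),
      y ∈ (P.foldl pvStep init).1 ↔ y ∈ init.1 ∨ ∃ p ∈ P, p.1 = p.2 ∧ y = p.1 := by
  induction P with
  | nil => intro init y; simp
  | cons q t ih =>
    intro init y
    simp only [List.foldl_cons, ih, List.mem_cons]
    unfold pvStep
    by_cases hq : q.1 = q.2
    · simp [hq, PySem.Set.mem_add, or_assoc]
    · simp [hq]

theorem pv_mem_cand (P : List (Int × Int)) :
    ∀ (init : PySem.Set Int × PySem.Set Int) (y : Int),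
      y ∈ (P.foldl pvStep init).2 ↔ y ∈ init.2 ∨ ∃ p ∈ P, ¬ p.1 = p.2 ∧ (y = p.1 ∨ y = p.2) := by
  induction P with
  | nil => intro init y; simp
  | cons q t ih =>
    intro init y
    simp only [List.foldl_cons, ih, List.mem_cons]
    unfold pvStep
    by_cases hq : q.1 = q.2
    · simp [hq]
    · simp [hq, PySem.Set.mem_add, or_assoc]

theorem pv_not_good_mem (P : List (Int × Int)) (y : Int) :
    y ∈ P.foldl (fun s p => if p.1 = p.2 then PySem.Set.add s p.1 else s) PySem.Set.empty ↔
    ∃ p ∈ P, p.1 = p.2 ∧ y = p.1 := by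
  rw [PySem.List.foldl_ite_eq_foldl_filter, PySem.Set.mem_foldl_add]
  simp [List.mem_filter]

theorem smallest_good_integer_eq (fronts backs : List Int)
    (hpre : fronts.length ≤ backs.length) :
    smallest_good_integer fronts backs = smallest_good_integer_alt fronts backs := by
  unfold smallest_good_integer smallest_good_integer_alt
  set P := fronts.zip backs with hP
  have hlenP : (P.length : Int) = (fronts.length : Int) := by
    simp [hP, List.length_zip]; omega
  have hget1 : ∀ i ∈ PySem.List.pyRange 0 (fronts.length : Int) 1,
      PySem.List.pyGetD fronts i 0 = (PySem.List.pyGetD P i (0, 0)).1 := by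
    intro i hi
    rw [PySem.List.mem_pyRange_one] at hi
    have hlen : P.length = fronts.length := by simp [hP, List.length_zip]; omega
    rw [PySem.List.pyGetD_eq_getElem fronts 0 hi.1 hi.2,
        PySem.List.pyGetD_eq_getElem P (0, 0) hi.1 (by rw [hlen]; exact hi.2)]
    simp [hP, List.getElem_zip]
  have hget2 : ∀ i ∈ PySem.List.pyRange 0 (fronts.length : Int) 1,
      PySem.List.pyGetD backs i 0 = (PySem.List.pyGetD P i (0, 0)).2 := by
    intro i hi
    rw [PySem.List.mem_pyRange_one] at hi
    have hlen : P.length = fronts.length := by simp [hP, List.length_zip]; omega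
    rw [PySem.List.pyGetD_eq_getElem backs 0 hi.1 (by omega),
        PySem.List.pyGetD_eq_getElem P (0, 0) hi.1 (by rw [hlen]; exact hi.2)]
    simp [hP, List.getElem_zip]
  -- A's bad set as a fold over P
  have hng : (PySem.List.pyRange 0 (fronts.length : Int) 1).foldl
      (fun s i => if PySem.List.pyGetD fronts i 0 = PySem.List.pyGetD backs i 0
        then PySem.Set.add s (PySem.List.pyGetD fronts i 0) else s) PySem.Set.empty
      = P.foldl (fun s p => if p.1 = p.2 then PySem.Set.add s p.1 else s) PySem.Set.empty := by
    rw [PySem.List.foldl_congr_mem _ _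
        (fun s i => (fun (s : PySem.Set Int) (p : Int × Int) =>
          if p.1 = p.2 then PySem.Set.add s p.1 else s) s (PySem.List.pyGetD P i (0, 0))) _
        (fun acc i hi => by simp only [hget1 i hi, hget2 i hi])]
    rw [← hlenP]
    exact PySem.List.foldl_pyRange_zero_pyGetD' P (0, 0)
      (fun s p => if p.1 = p.2 then PySem.Set.add s p.1 else s) PySem.Set.empty
  set bad := P.foldl (fun s p => if p.1 = p.2 then PySem.Set.add s p.1 else s) PySem.Set.empty with hbad
  -- B's pair of sets as a fold over P
  have hst : (PySem.List.pyRange 0 (fronts.length : Int) 1).foldl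
      (fun (s : PySem.Set Int × PySem.Set Int) i =>
        let f := PySem.List.pyGetD fronts i 0
        let b := PySem.List.pyGetD backs i 0
        if f = b then (PySem.Set.add s.1 f, s.2)
        else (s.1, PySem.Set.add (PySem.Set.add s.2 f) b))
      (PySem.Set.empty, PySem.Set.empty)
      = P.foldl pvStep (PySem.Set.empty, PySem.Set.empty) := by
    rw [PySem.List.foldl_congr_mem _ _
        (fun s i => pvStep s (PySem.List.pyGetD P i (0, 0))) _
        (fun acc i hi => by simp only [hget1 i hi, hget2 i hi]; rfl)]
    rw [← hlenP]
    exact PySem.List.foldl_pyRange_zero_pyGetD' P (0, 0) pvStep (PySem.Set.empty, PySem.Set.empty)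
  simp only [hng, hst]
  set st := P.foldl pvStep (PySem.Set.empty, PySem.Set.empty) with hstdef
  -- members of B's bad are exactly members of A's bad
  have hbadmem : ∀ y, y ∈ st.1 ↔ y ∈ bad := by
    intro y
    rw [hstdef, pv_mem_bad, hbad, pv_not_good_mem]
    simp [PySem.Set.empty]
  -- A's loop = running min over the filtered flat list of values
  have hbody : (fun (r : Option Int) (i : Int) =>
        let r := if !(PySem.Set.contains bad (PySem.List.pyGetD fronts i 0)) then
            some (match r with
                  | none => PySem.List.pyGetD fronts i 0
                  | some v => min v (PySem.List.pyGetD fronts i 0))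
          else r
        if !(PySem.Set.contains bad (PySem.List.pyGetD backs i 0)) then
          some (match r with
                | none => PySem.List.pyGetD backs i 0
                | some v => min v (PySem.List.pyGetD backs i 0))
        else r) = (fun r i =>
        let r := if !(PySem.Set.contains bad (PySem.List.pyGetD fronts i 0))
          then pvOptMin r (PySem.List.pyGetD fronts i 0) else r
        if !(PySem.Set.contains bad (PySem.List.pyGetD backs i 0))
          then pvOptMin r (PySem.List.pyGetD backs i 0) else r) := rfl
  rw [hbody]
  have hrange : (PySem.List.pyRange 0 (fronts.length : Int) 1).foldl
      (fun (r : Option Int) (i : Int) =>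
        let r := if !(PySem.Set.contains bad (PySem.List.pyGetD fronts i 0))
          then pvOptMin r (PySem.List.pyGetD fronts i 0) else r
        if !(PySem.Set.contains bad (PySem.List.pyGetD backs i 0))
          then pvOptMin r (PySem.List.pyGetD backs i 0) else r) none
      = P.foldl
      (fun r p =>
        let r := if !(PySem.Set.contains bad p.1) then pvOptMin r p.1 else r
        if !(PySem.Set.contains bad p.2) then pvOptMin r p.2 else r) none := by
    rw [PySem.List.foldl_congr_mem _ _
        (fun r i => (fun (r : Option Int) (p : Int × Int) =>
          let r := if !(PySem.Set.contains bad p.1) then pvOptMin r p.1 else r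
          if !(PySem.Set.contains bad p.2) then pvOptMin r p.2 else r) r
          (PySem.List.pyGetD P i (0, 0))) _
        (fun acc i hi => by simp only [hget1 i hi, hget2 i hi])]
    rw [← hlenP]
    exact PySem.List.foldl_pyRange_zero_pyGetD' P ((0 : Int), (0 : Int))
      (fun (r : Option Int) (p : Int × Int) =>
        let r := if !(PySem.Set.contains bad p.1) then pvOptMin r p.1 else r
        if !(PySem.Set.contains bad p.2) then pvOptMin r p.2 else r) none
  rw [hrange]
  have hres : P.foldl
      (fun r p =>
        let r := if !(PySem.Set.contains bad p.1) then pvOptMin r p.1 else r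
        if !(PySem.Set.contains bad p.2) then pvOptMin r p.2 else r) none
      = ((P.flatMap (fun p => [p.1, p.2])).filter
          (fun x => !(PySem.Set.contains bad x))).foldl pvOptMin none := by
    have hfm : (P.flatMap (fun p => [p.1, p.2])).filter (fun x => !(PySem.Set.contains bad x))
        = P.flatMap (fun p => [p.1, p.2].filter (fun x => !(PySem.Set.contains bad x))) := by
      induction P with
      | nil => rfl
      | cons q t ih => simp only [List.flatMap_cons, List.filter_append, ih]
    rw [hfm]
    refine pv_foldl_flatMap _ pvOptMin _ ?_ P none
    intro r p
    have c1 : PySem.Set.contains bad p.1 = decide (p.1 ∈ bad) := by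
      by_cases h : p.1 ∈ bad <;> simp [h]
    have c2 : PySem.Set.contains bad p.2 = decide (p.2 ∈ bad) := by
      by_cases h : p.2 ∈ bad <;> simp [h]
    simp only [c1, c2]
    by_cases m1 : p.1 ∈ bad <;> by_cases m2 : p.2 ∈ bad <;>
      simp [m1, m2, List.filter, pvOptMin]
  rw [hres, pv_foldl_vs_min?]
  -- B's scan of the sorted candidates = min? over the same good values
  set S := PySem.List.sorted st.2 (fun x => x) with hS
  rw [pv_find?_sorted_eq_min?_filter S _ (PySem.List.sorted_pairwise st.2 (fun x => x))]
  have hsame : ∀ y, y ∈ (P.flatMap (fun p => [p.1, p.2])).filter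
      (fun x => !(PySem.Set.contains bad x)) ↔
      y ∈ S.filter (fun x => !(PySem.Set.contains st.1 x)) := by
    intro y
    simp only [List.mem_filter, hS, PySem.List.mem_sorted, Bool.not_eq_eq_eq_not, Bool.not_true,
      ← Bool.not_eq_true]
    constructor
    · rintro ⟨hmem, hnb⟩
      have hnb' : y ∉ bad := fun h => hnb (by rw [PySem.Set.contains_iff]; exact h)
      rcases List.mem_flatMap.mp hmem with ⟨p, hp, hy⟩
      simp only [List.mem_cons, List.not_mem_nil, or_false] at hy
      refine ⟨(pv_mem_cand P _ y).mpr (Or.inr ⟨p, hp, ?_, hy⟩), ?_⟩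
      · intro heq
        apply hnb'
        rcases hy with hy | hy
        · exact (pv_not_good_mem P y).mpr ⟨p, hp, heq, hy⟩
        · exact (pv_not_good_mem P y).mpr ⟨p, hp, heq, by rw [hy, heq]⟩
      · intro h
        exact hnb (by rw [pv_contains_congr hbadmem y] at h; exact h)
    · rintro ⟨hmem, hnb⟩
      have hnb2 : ¬ PySem.Set.contains bad y = true := by
        rw [← pv_contains_congr hbadmem y]; exact fun h => hnb h
      rcases (pv_mem_cand P _ y).mp hmem with h | ⟨p, hp, _, hy⟩
      · simp [PySem.Set.empty] at h
      · exact ⟨List.mem_flatMap.mpr ⟨p, hp, by rcases hy with hy | hy <;> simp [hy]⟩, hnb2⟩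
  rw [pv_min?_congr _ _ hsame]
  cases PySem.List.min? (S.filter (fun x => !(PySem.Set.contains st.1 x))) (fun x => x) <;> rfl

-- ===== VERDICT (by name: the statement is the Claim_ definition above) =====
theorem smallest_good_integer_spec : Claim_equal_smallest_good_integer := by
  intro fronts backs _ hpre
  unfold Spec_smallest_good_integer
  exact smallest_good_integer_eq fronts backs hpre
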